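-- pv_equiv track=rewrite | github.com/Chernoplodich/fantik | src/app/domain/fanfics/services/paginator.py | _select_best_cut
-- ===== SOURCE A (Python) =====
-- def _select_best_cut(cuts: list[tuple[int, int]], start: int, end_cap: int) -> int | None:
--     """Найти наилучшую точку реза в диапазоне (start, end_cap].
--
--     Критерии: максимальный priority, tie-break — ближе к end_cap (больший pos).
--     """
--     best_pos: int | None = None
--     best_pri = 0
--     for pos, pri in cuts:
--         if pos <= start:
--             continue
--         if pos > end_cap:
--             break
--         if pri > best_pri or (pri == best_pri and (best_pos is None or pos > best_pos)):
--             best_pri = pri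
--             best_pos = pos
--     return best_pos
-- ===== SOURCE B (Python) =====
-- def _select_best_cut(cuts, start, end_cap):
--     """Best cut in (start, end_cap]: highest priority wins, ties go to the largest position."""
--     window = []
--     for pos, pri in cuts:
--         if pos > end_cap:
--             break
--         if pos > start:
--             window.append((pos, pri))
--     if not window:
--         return None
--     top = max(pri for _, pri in window)
--     return max(pos for pos, pri in window if pri == top)
-- ===== Notes on version B (the rewrite author's own statement) =====
-- stated objective: alternative
-- what changed: Replaces the single-pass running best_pos/best_pri argmax with a staged decomposition: build the eligible window, compute the top priority with one max, then return the largest position at that priority with a second max.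
-- intended difference: On inputs whose eligible window (pos in (start, end_cap], up to the first pos > end_cap) is nonempty but contains only negative priorities, A returns None because its best_pri=0 floor silently discards them, while B returns the genuinely best cut (max priority, then max position); the docstring promises the maximal-priority cut, so B's value is the intended one. — e.g. on _select_best_cut([(1, -1)], 0, 5): A returns none, B returns some 1
import Mathlib
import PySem

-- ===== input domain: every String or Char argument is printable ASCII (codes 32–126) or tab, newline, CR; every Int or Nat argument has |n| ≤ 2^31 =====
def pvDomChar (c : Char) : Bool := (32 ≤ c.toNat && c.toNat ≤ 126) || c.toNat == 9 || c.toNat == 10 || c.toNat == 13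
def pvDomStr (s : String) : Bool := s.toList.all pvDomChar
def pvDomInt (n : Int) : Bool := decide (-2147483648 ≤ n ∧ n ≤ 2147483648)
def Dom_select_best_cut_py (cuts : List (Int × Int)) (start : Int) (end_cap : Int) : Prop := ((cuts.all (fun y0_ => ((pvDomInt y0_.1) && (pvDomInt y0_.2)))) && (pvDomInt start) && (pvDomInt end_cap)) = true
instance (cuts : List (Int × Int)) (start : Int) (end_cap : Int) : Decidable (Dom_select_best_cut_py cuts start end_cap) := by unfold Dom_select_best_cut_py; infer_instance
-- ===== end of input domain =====

-- B restructures A's running-argmax loop into window-building plus two staged maxima (top priority,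
-- then furthest position at that priority); on all-negative-priority windows B fixes A's best_pri=0 floor.

-- ===== PORT A =====
-- A's for-loop with `continue`/`break` and mutable state (best_pos, best_pri), as structural recursion.
def aLoop (start end_cap : Int) : List (Int × Int) → Option Int → Int → Option Int
  | [], best_pos, _ => best_pos
  | (pos, pri) :: rest, best_pos, best_pri =>
    if pos ≤ start then aLoop start end_cap rest best_pos best_pri
    else if pos > end_cap then best_pos
    else if pri > best_pri ∨ (pri = best_pri ∧ (best_pos = none ∨ ∃ p, best_pos = some p ∧ pos > p)) then
      aLoop start end_cap rest (some pos) pri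
    else aLoop start end_cap rest best_pos best_pri

def select_best_cut_py (cuts : List (Int × Int)) (start : Int) (end_cap : Int) : Option Int :=
  aLoop start end_cap cuts none 0

-- ===== PORT B =====
-- B's windowing loop: collect the (pos, pri) entries with start < pos, stopping at the first pos > end_cap.
def bWindow (start end_cap : Int) : List (Int × Int) → List (Int × Int)
  | [] => []
  | (pos, pri) :: rest =>
    if pos > end_cap then []
    else if pos > start then (pos, pri) :: bWindow start end_cap rest
    else bWindow start end_cap rest

-- B's two staged maxima: `max(pri for …)` then `max(pos for … if pri == top)` (the second generator is
-- nonempty because top is attained; the [] branch is unreachable).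
def select_best_cut_py_alt (cuts : List (Int × Int)) (start : Int) (end_cap : Int) : Option Int :=
  match bWindow start end_cap cuts with
  | [] => none
  | c :: rest =>
    let top := rest.foldl (fun m p => max m p.2) c.2
    match (c :: rest).filter (fun p => p.2 == top) with
    | [] => none
    | d :: ds => some (ds.foldl (fun m p => max m p.1) d.1)

-- ===== PRECONDITION & SPEC =====
-- On inputs whose eligible window (pos in (start, end_cap], up to the first pos > end_cap) is nonempty but
-- contains only negative priorities, A returns none because its best_pri=0 floor silently discards them,
-- while B returns the genuinely best cut (max priority, then max position), which is what the function's
-- stated criteria ask for.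
def D_select_best_cut_py (cuts : List (Int × Int)) (start : Int) (end_cap : Int) : Prop :=
  let w := (cuts.takeWhile (fun c => decide (c.1 ≤ end_cap))).filter (fun c => decide (start < c.1))
  w ≠ [] ∧ ∀ c ∈ w, c.2 < 0
instance (cuts : List (Int × Int)) (start : Int) (end_cap : Int) : Decidable (D_select_best_cut_py cuts start end_cap) := by unfold D_select_best_cut_py; infer_instance

def Spec_select_best_cut_py (cuts : List (Int × Int)) (start : Int) (end_cap : Int) (out : Option Int) : Prop := ¬ D_select_best_cut_py cuts start end_cap → out = select_best_cut_py_alt cuts start end_cap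
instance (cuts : List (Int × Int)) (start : Int) (end_cap : Int) (out : Option Int) : Decidable (Spec_select_best_cut_py cuts start end_cap out) := by unfold Spec_select_best_cut_py; infer_instance

def pvDiffWitness_select_best_cut_py : (List (Int × Int)) × Int × Int := ([(1, -1)], 0, 5)
def pvDiffWitnessOut_select_best_cut_py : (Option Int) × (Option Int) := (none, some 1)

-- ===== CLAIM (what is proved, stated in full; the proofs are below) =====
def Claim_unchanged_select_best_cut_py : Prop := ∀ (cuts : List (Int × Int)) (start : Int) (end_cap : Int), Dom_select_best_cut_py cuts start end_cap → Spec_select_best_cut_py cuts start end_cap (select_best_cut_py cuts start end_cap)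
def Claim_changed_select_best_cut_py : Prop := Dom_select_best_cut_py (pvDiffWitness_select_best_cut_py.1) (pvDiffWitness_select_best_cut_py.2.1) (pvDiffWitness_select_best_cut_py.2.2) ∧ D_select_best_cut_py (pvDiffWitness_select_best_cut_py.1) (pvDiffWitness_select_best_cut_py.2.1) (pvDiffWitness_select_best_cut_py.2.2) ∧ select_best_cut_py (pvDiffWitness_select_best_cut_py.1) (pvDiffWitness_select_best_cut_py.2.1) (pvDiffWitness_select_best_cut_py.2.2) = pvDiffWitnessOut_select_best_cut_py.1 ∧ select_best_cut_py_alt (pvDiffWitness_select_best_cut_py.1) (pvDiffWitness_select_best_cut_py.2.1) (pvDiffWitness_select_best_cut_py.2.2) = pvDiffWitnessOut_select_best_cut_py.2 ∧ pvDiffWitnessOut_select_best_cut_py.1 ≠ pvDiffWitnessOut_select_best_cut_py.2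
def Claim_exact_select_best_cut_py : Prop := ∀ (cuts : List (Int × Int)) (start : Int) (end_cap : Int), Dom_select_best_cut_py cuts start end_cap → D_select_best_cut_py cuts start end_cap → select_best_cut_py cuts start end_cap ≠ select_best_cut_py_alt cuts start end_cap

-- ===== LEMMAS AND PROOFS =====

-- A's update step, on bare (pos, pri) pairs: keep the new pair iff it wins by (pri, pos).
def bStep (cur new : Int × Int) : Int × Int :=
  if new.2 > cur.2 ∨ (new.2 = cur.2 ∧ new.1 > cur.1) then new else cur

-- lexicographic order by (pri, pos) on (pos, pri) pairs
def lexLE (a b : Int × Int) : Prop := a.2 < b.2 ∨ (a.2 = b.2 ∧ a.1 ≤ b.1)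

theorem lexLE_refl (a : Int × Int) : lexLE a a := Or.inr ⟨rfl, le_refl _⟩

theorem lexLE_trans {a b c : Int × Int} (h1 : lexLE a b) (h2 : lexLE b c) : lexLE a c := by
  unfold lexLE at *; omega

theorem lexLE_antisymm {a b : Int × Int} (h1 : lexLE a b) (h2 : lexLE b a) : a = b := by
  obtain ⟨a1, a2⟩ := a; obtain ⟨b1, b2⟩ := b
  unfold lexLE at *; simp_all; omega

theorem bStep_cases (c n : Int × Int) : bStep c n = c ∨ bStep c n = n := by
  unfold bStep; split_ifs <;> simp

theorem lexLE_bStep_left (c n : Int × Int) : lexLE c (bStep c n) := by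
  unfold bStep lexLE; split_ifs with h <;> [omega; exact Or.inr ⟨rfl, le_refl _⟩]

theorem lexLE_bStep_right (c n : Int × Int) : lexLE n (bStep c n) := by
  unfold bStep lexLE; split_ifs with h
  · exact Or.inr ⟨rfl, le_refl _⟩
  · omega

theorem foldl_bStep_mem : ∀ (t : List (Int × Int)) (acc : Int × Int),
    t.foldl bStep acc = acc ∨ t.foldl bStep acc ∈ t := by
  intro t
  induction t with
  | nil => intro acc; simp
  | cons x xs ih =>
    intro acc
    rcases ih (bStep acc x) with h | h
    · rcases bStep_cases acc x with h2 | h2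
      · left; simpa [List.foldl, h2] using h.trans h2
      · right
        have : List.foldl bStep acc (x :: xs) = x := by
          simp only [List.foldl]; rw [h, h2]
        rw [this]; exact List.mem_cons_self
    · right; simp only [List.foldl]; exact List.mem_cons_of_mem _ h

theorem foldl_bStep_ub_acc : ∀ (t : List (Int × Int)) (acc : Int × Int),
    lexLE acc (t.foldl bStep acc) := by
  intro t
  induction t with
  | nil => intro acc; exact lexLE_refl acc
  | cons x xs ih =>
    intro acc
    exact lexLE_trans (lexLE_bStep_left acc x) (ih (bStep acc x))

theorem foldl_bStep_ub_mem : ∀ (t : List (Int × Int)) (acc x : Int × Int), x ∈ t →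
    lexLE x (t.foldl bStep acc) := by
  intro t
  induction t with
  | nil => intro acc x hx; simp at hx
  | cons y ys ih =>
    intro acc x hx
    rcases List.mem_cons.mp hx with h | h
    · subst h
      exact lexLE_trans (lexLE_bStep_right acc x) (foldl_bStep_ub_acc ys (bStep acc x))
    · exact ih (bStep acc y) x h

-- folds of max over the snd (priority) and fst (position) components
theorem foldl_max2_acc_le : ∀ (l : List (Int × Int)) (a : Int),
    a ≤ l.foldl (fun m p => max m p.2) a := by
  intro l
  induction l with
  | nil => intro a; simp
  | cons x xs ih => intro a; exact le_trans (le_max_left a x.2) (ih (max a x.2))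

theorem foldl_max2_mem_le : ∀ (l : List (Int × Int)) (a : Int) (x : Int × Int), x ∈ l →
    x.2 ≤ l.foldl (fun m p => max m p.2) a := by
  intro l
  induction l with
  | nil => intro a x hx; simp at hx
  | cons y ys ih =>
    intro a x hx
    rcases List.mem_cons.mp hx with h | h
    · subst h; exact le_trans (le_max_right a x.2) (foldl_max2_acc_le ys (max a x.2))
    · exact ih (max a y.2) x h

theorem foldl_max2_attain : ∀ (l : List (Int × Int)) (a : Int),
    l.foldl (fun m p => max m p.2) a = a ∨ ∃ x ∈ l, l.foldl (fun m p => max m p.2) a = x.2 := by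
  intro l
  induction l with
  | nil => intro a; simp
  | cons y ys ih =>
    intro a
    rcases ih (max a y.2) with h | ⟨x, hx, h⟩
    · simp only [List.foldl] at *
      rcases max_choice a y.2 with h2 | h2
      · left; rw [h, h2]
      · right; exact ⟨y, List.mem_cons_self, by rw [h, h2]⟩
    · right; exact ⟨x, List.mem_cons_of_mem _ hx, h⟩

theorem foldl_max1_acc_le : ∀ (l : List (Int × Int)) (a : Int),
    a ≤ l.foldl (fun m p => max m p.1) a := by
  intro l
  induction l with
  | nil => intro a; simp
  | cons x xs ih => intro a; exact le_trans (le_max_left a x.1) (ih (max a x.1))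

theorem foldl_max1_mem_le : ∀ (l : List (Int × Int)) (a : Int) (x : Int × Int), x ∈ l →
    x.1 ≤ l.foldl (fun m p => max m p.1) a := by
  intro l
  induction l with
  | nil => intro a x hx; simp at hx
  | cons y ys ih =>
    intro a x hx
    rcases List.mem_cons.mp hx with h | h
    · subst h; exact le_trans (le_max_right a x.1) (foldl_max1_acc_le ys (max a x.1))
    · exact ih (max a y.1) x h

theorem foldl_max1_attain : ∀ (l : List (Int × Int)) (a : Int),
    l.foldl (fun m p => max m p.1) a = a ∨ ∃ x ∈ l, l.foldl (fun m p => max m p.1) a = x.1 := by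
  intro l
  induction l with
  | nil => intro a; simp
  | cons y ys ih =>
    intro a
    rcases ih (max a y.1) with h | ⟨x, hx, h⟩
    · simp only [List.foldl] at *
      rcases max_choice a y.1 with h2 | h2
      · left; rw [h, h2]
      · right; exact ⟨y, List.mem_cons_self, by rw [h, h2]⟩
    · right; exact ⟨x, List.mem_cons_of_mem _ hx, h⟩

-- A's effective candidate window: eligible entries that additionally have nonnegative priority.
def aWin (start end_cap : Int) : List (Int × Int) → List (Int × Int)
  | [] => []
  | (pos, pri) :: rest =>
    if pos > end_cap then []
    else if pos > start ∧ 0 ≤ pri then (pos, pri) :: aWin start end_cap rest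
    else aWin start end_cap rest

theorem aWin_eq_filter (start end_cap : Int) : ∀ (l : List (Int × Int)),
    aWin start end_cap l = (bWindow start end_cap l).filter (fun c => decide (0 ≤ c.2)) := by
  intro l
  induction l with
  | nil => simp [aWin, bWindow]
  | cons hd tl ih =>
    obtain ⟨pos, pri⟩ := hd
    by_cases h1 : pos > end_cap
    · simp [aWin, bWindow, h1]
    · by_cases h2 : pos > start
      · by_cases h3 : (0:Int) ≤ pri
        · simp [aWin, bWindow, h1, h2, h3, ih]
        · simp [aWin, bWindow, h1, h2, h3, ih]
      · have : ¬ (pos > start ∧ 0 ≤ pri) := fun hc => h2 hc.1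
        simp [aWin, bWindow, h1, h2, this, ih]

theorem bWindow_eq_takeWhile (start end_cap : Int) : ∀ (l : List (Int × Int)),
    bWindow start end_cap l
      = (l.takeWhile (fun c => decide (c.1 ≤ end_cap))).filter (fun c => decide (start < c.1)) := by
  intro l
  induction l with
  | nil => simp [bWindow]
  | cons hd tl ih =>
    obtain ⟨pos, pri⟩ := hd
    by_cases h1 : pos > end_cap
    · have : ¬ pos ≤ end_cap := by omega
      simp [bWindow, h1, List.takeWhile, this]
    · have hle : pos ≤ end_cap := by omega
      by_cases h2 : pos > start
      · simp [bWindow, h1, h2, List.takeWhile, hle, ih]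
      · have : ¬ start < pos := by omega
        simp [bWindow, h1, h2, List.takeWhile, hle, this, ih]

-- If the cap lies strictly below start, A's loop can never update nor reach a candidate: it returns its state.
theorem aLoop_of_cap_lt_start (start end_cap : Int) (h : end_cap < start) :
    ∀ (l : List (Int × Int)) (bp : Option Int) (bq : Int), aLoop start end_cap l bp bq = bp := by
  intro l
  induction l with
  | nil => intro bp bq; simp [aLoop]
  | cons hd tl ih =>
    intro bp bq
    obtain ⟨pos, pri⟩ := hd
    by_cases h1 : pos ≤ start
    · simp [aLoop, h1, ih]
    · have h2 : pos > end_cap := by omega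
      simp [aLoop, h1, h2]

-- Invariant: once A holds a best (some p, q) with 0 ≤ q, finishing A's loop is folding bStep over aWin.
theorem aLoop_some (start end_cap : Int) :
    ∀ (l : List (Int × Int)) (p q : Int), 0 ≤ q →
      aLoop start end_cap l (some p) q = some ((aWin start end_cap l).foldl bStep (p, q)).1 := by
  intro l
  induction l with
  | nil => intro p q _; simp [aLoop, aWin]
  | cons hd tl ih =>
    intro p q hq
    obtain ⟨pos, pri⟩ := hd
    by_cases h1 : pos ≤ start
    · by_cases h2 : pos > end_cap
      · have hlt : end_cap < start := by omega
        rw [show aLoop start end_cap ((pos, pri) :: tl) (some p) q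
              = aLoop start end_cap tl (some p) q by simp [aLoop, h1],
            aLoop_of_cap_lt_start start end_cap hlt]
        simp [aWin, h2]
      · have h3 : ¬ (pos > start ∧ 0 ≤ pri) := by omega
        simp only [aWin, if_neg h2, if_neg h3]
        simp [aLoop, h1, ih _ _ hq]
    · by_cases h2 : pos > end_cap
      · simp [aLoop, h1, h2, aWin]
      · have hps : pos > start := by omega
        by_cases h4 : (0:Int) ≤ pri
        · simp only [aWin, if_neg h2, if_pos (And.intro hps h4)]
          by_cases h5 : pri > q ∨ (pri = q ∧ pos > p)
          · have hcond : pri > q ∨ (pri = q ∧ ((some p : Option Int) = none ∨ ∃ r, (some p : Option Int) = some r ∧ pos > r)) := by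
              rcases h5 with h | ⟨he, hpp⟩
              · exact Or.inl h
              · exact Or.inr ⟨he, Or.inr ⟨p, rfl, hpp⟩⟩
            have hstep : bStep (p, q) (pos, pri) = (pos, pri) := by
              simp only [bStep]; rw [if_pos (by simpa using h5)]
            simp only [aLoop, if_neg h1, if_neg h2, if_pos hcond, List.foldl, hstep]
            exact ih pos pri h4
          · have hcond : ¬ (pri > q ∨ (pri = q ∧ ((some p : Option Int) = none ∨ ∃ r, (some p : Option Int) = some r ∧ pos > r))) := by
              push_neg at h5 ⊢
              refine ⟨h5.1, fun he => ⟨Option.some_ne_none p, fun r hr => ?_⟩⟩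
              have hpr := h5.2 he
              injection hr with h
              omega
            have hstep : bStep (p, q) (pos, pri) = (p, q) := by
              simp only [bStep]; rw [if_neg (by simpa using h5)]
            simp only [aLoop, if_neg h1, if_neg h2, if_neg hcond, List.foldl, hstep]
            exact ih p q hq
        · -- negative priority: skipped by A (since 0 ≤ q) and absent from aWin
          have hcond : ¬ (pri > q ∨ (pri = q ∧ ((some p : Option Int) = none ∨ ∃ r, (some p : Option Int) = some r ∧ pos > r))) := by
            push_neg
            constructor
            · omega
            · intro he; omega
          have hfilt : ¬ (pos > start ∧ 0 ≤ pri) := fun hc => h4 hc.2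
          simp only [aWin, if_neg h2, if_neg hfilt]
          simp only [aLoop, if_neg h1, if_neg h2, if_neg hcond]
          exact ih p q hq

-- From the initial state (none, 0): A's loop is the lexicographic fold over aWin.
theorem aLoop_none (start end_cap : Int) :
    ∀ (l : List (Int × Int)),
      aLoop start end_cap l none 0 =
        (match aWin start end_cap l with
         | [] => none
         | h :: t => some ((t.foldl bStep h).1)) := by
  intro l
  induction l with
  | nil => simp [aLoop, aWin]
  | cons hd tl ih =>
    obtain ⟨pos, pri⟩ := hd
    by_cases h1 : pos ≤ start
    · by_cases h2 : pos > end_cap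
      · have hlt : end_cap < start := by omega
        rw [show aLoop start end_cap ((pos, pri) :: tl) none 0
              = aLoop start end_cap tl none 0 by simp [aLoop, h1],
            aLoop_of_cap_lt_start start end_cap hlt]
        simp [aWin, h2]
      · have h3 : ¬ (pos > start ∧ 0 ≤ pri) := by omega
        simp only [aWin, if_neg h2, if_neg h3]
        simp [aLoop, h1, ih]
    · by_cases h2 : pos > end_cap
      · simp [aLoop, h1, h2, aWin]
      · have hps : pos > start := by omega
        by_cases h4 : (0:Int) ≤ pri
        · have hcond : pri > 0 ∨ pri = 0 ∧ (True ∨ ∃ r, (none : Option Int) = some r ∧ pos > r) := by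
            rcases lt_or_eq_of_le h4 with h | h
            · exact Or.inl h
            · exact Or.inr ⟨h.symm, Or.inl trivial⟩
          simp only [aWin, if_neg h2, if_pos (And.intro hps h4)]
          simp only [aLoop, if_neg h1, if_neg h2]
          rw [if_pos (by simpa using hcond)]
          exact aLoop_some start end_cap tl pos pri h4
        · have hcond : ¬ (pri > 0 ∨ pri = 0 ∧ (True ∨ ∃ r, (none : Option Int) = some r ∧ pos > r)) := by
            rintro (h | ⟨h, _⟩) <;> omega
          have hfilt : ¬ (pos > start ∧ 0 ≤ pri) := fun hc => h4 hc.2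
          simp only [aWin, if_neg h2, if_neg hfilt]
          simp only [aLoop, if_neg h1, if_neg h2]
          rw [if_neg (by simpa using hcond)]
          exact ih

-- B on a nonempty window: the two staged maxima produce a pair that is in the window and is a
-- lexicographic (pri, pos) upper bound for it.
theorem staged_spec (c : Int × Int) (rest : List (Int × Int)) :
    ∃ d ds, (c :: rest).filter (fun p => p.2 == rest.foldl (fun m p => max m p.2) c.2) = d :: ds ∧
      ((ds.foldl (fun m p => max m p.1) d.1, rest.foldl (fun m p => max m p.2) c.2) ∈ c :: rest ∧
       ∀ x ∈ c :: rest, lexLE x (ds.foldl (fun m p => max m p.1) d.1, rest.foldl (fun m p => max m p.2) c.2)) := by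
  set top := rest.foldl (fun m p => max m p.2) c.2 with htop
  have hattain : ∃ y ∈ c :: rest, y.2 = top := by
    rcases foldl_max2_attain rest c.2 with h | ⟨x, hx, h⟩
    · exact ⟨c, List.mem_cons_self, h.symm⟩
    · exact ⟨x, List.mem_cons_of_mem _ hx, h.symm⟩
  have hub2 : ∀ x ∈ c :: rest, x.2 ≤ top := by
    intro x hx
    rcases List.mem_cons.mp hx with h | h
    · subst h; exact foldl_max2_acc_le rest x.2
    · exact foldl_max2_mem_le rest c.2 x h
  obtain ⟨y, hy, hy2⟩ := hattain
  have hymem : y ∈ (c :: rest).filter (fun p => p.2 == top) :=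
    List.mem_filter.mpr ⟨hy, by simp [hy2]⟩
  cases hf : (c :: rest).filter (fun p => p.2 == top) with
  | nil => rw [hf] at hymem; simp at hymem
  | cons d ds =>
    refine ⟨d, ds, rfl, ?_, ?_⟩
    · -- the staged pair is an element of the window
      have hPa : ds.foldl (fun m p => max m p.1) d.1 = d.1 ∨
          ∃ x ∈ ds, ds.foldl (fun m p => max m p.1) d.1 = x.1 := foldl_max1_attain ds d.1
      have hmem_of : ∀ e ∈ d :: ds, e ∈ c :: rest ∧ e.2 = top := by
        intro e he
        rw [← hf] at he
        have := List.mem_filter.mp he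
        exact ⟨this.1, by simpa using this.2⟩
      rcases hPa with h | ⟨x, hx, h⟩
      · obtain ⟨hmem, he2⟩ := hmem_of d List.mem_cons_self
        have : (ds.foldl (fun m p => max m p.1) d.1, top) = d := by
          rw [h, ← he2]
        rw [this]; exact hmem
      · obtain ⟨hmem, he2⟩ := hmem_of x (List.mem_cons_of_mem _ hx)
        have : (ds.foldl (fun m p => max m p.1) d.1, top) = x := by
          rw [h, ← he2]
        rw [this]; exact hmem
    · -- and an upper bound for the window
      intro x hx
      by_cases hxt : x.2 = top
      · have hxf : x ∈ d :: ds := by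
          rw [← hf]; exact List.mem_filter.mpr ⟨hx, by simp [hxt]⟩
        have hx1 : x.1 ≤ ds.foldl (fun m p => max m p.1) d.1 := by
          rcases List.mem_cons.mp hxf with h | h
          · subst h; exact foldl_max1_acc_le ds x.1
          · exact foldl_max1_mem_le ds d.1 x h
        exact Or.inr ⟨hxt, hx1⟩
      · exact Or.inl (lt_of_le_of_ne (hub2 x hx) hxt)

theorem alt_eq (cuts : List (Int × Int)) (start end_cap : Int) (c : Int × Int) (rest : List (Int × Int))
    (h : bWindow start end_cap cuts = c :: rest) :
    select_best_cut_py_alt cuts start end_cap =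
      (match (c :: rest).filter (fun p => p.2 == rest.foldl (fun m p => max m p.2) c.2) with
       | [] => none
       | d :: ds => some (ds.foldl (fun m p => max m p.1) d.1)) := by
  unfold select_best_cut_py_alt; rw [h]

-- ===== VERDICT (by name: the statements are the Claim_ definitions above) =====
theorem select_best_cut_py_spec : Claim_unchanged_select_best_cut_py := by
  intro cuts start end_cap _
  unfold Spec_select_best_cut_py
  intro hnd
  unfold select_best_cut_py
  rw [aLoop_none]
  cases hw : bWindow start end_cap cuts with
  | nil =>
    have ha : aWin start end_cap cuts = [] := by
      rw [aWin_eq_filter, hw]; rfl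
    rw [ha]
    unfold select_best_cut_py_alt
    rw [hw]
  | cons c rest =>
    -- ¬D_ and a nonempty window give a nonnegative-priority element
    have hx : ∃ x ∈ c :: rest, 0 ≤ x.2 := by
      by_contra hcon
      push_neg at hcon
      apply hnd
      unfold D_select_best_cut_py
      rw [← bWindow_eq_takeWhile, hw]
      exact ⟨by simp, fun y hy => by have := hcon y hy; omega⟩
    obtain ⟨x, hxmem, hxnn⟩ := hx
    obtain ⟨d, ds, hf, hPmem, hPub⟩ := staged_spec c rest
    rw [alt_eq cuts start end_cap c rest hw, hf]
    have htopnn : (0:Int) ≤ rest.foldl (fun m p => max m p.2) c.2 := by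
      have := hPub x hxmem
      unfold lexLE at this
      omega
    have hPa : (ds.foldl (fun m p => max m p.1) d.1, rest.foldl (fun m p => max m p.2) c.2)
        ∈ aWin start end_cap cuts := by
      rw [aWin_eq_filter, hw]
      exact List.mem_filter.mpr ⟨hPmem, by simpa using htopnn⟩
    cases ha : aWin start end_cap cuts with
    | nil => rw [ha] at hPa; simp at hPa
    | cons h t =>
      rw [ha] at hPa
      have haw : aWin start end_cap cuts ⊆ c :: rest := by
        rw [aWin_eq_filter, hw]; exact fun x hx => (List.mem_filter.mp hx).1
      have hLmem : t.foldl bStep h ∈ c :: rest := by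
        apply haw; rw [ha]
        rcases foldl_bStep_mem t h with hh | hh
        · rw [hh]; exact List.mem_cons_self
        · exact List.mem_cons_of_mem _ hh
      have h1 : lexLE (t.foldl bStep h)
          (ds.foldl (fun m p => max m p.1) d.1, rest.foldl (fun m p => max m p.2) c.2) :=
        hPub _ hLmem
      have h2 : lexLE (ds.foldl (fun m p => max m p.1) d.1, rest.foldl (fun m p => max m p.2) c.2)
          (t.foldl bStep h) := by
        rcases List.mem_cons.mp hPa with hh | hh
        · rw [hh]; exact foldl_bStep_ub_acc t h
        · exact foldl_bStep_ub_mem t h _ hh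
      have := lexLE_antisymm h1 h2
      show some ((t.foldl bStep h).1)
        = some (ds.foldl (fun m p => max m p.1) d.1)
      rw [this]

theorem select_best_cut_py_changed : Claim_changed_select_best_cut_py := by
  unfold Claim_changed_select_best_cut_py; decide

theorem select_best_cut_py_tight : Claim_exact_select_best_cut_py := by
  intro cuts start end_cap _ hD
  unfold D_select_best_cut_py at hD
  rw [← bWindow_eq_takeWhile] at hD
  obtain ⟨hne, hneg⟩ := hD
  -- A returns none: every window entry has negative priority, so aWin is empty
  have ha : aWin start end_cap cuts = [] := by
    rw [aWin_eq_filter]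
    apply List.filter_eq_nil_iff.mpr
    intro x hx
    have := hneg x hx
    simpa using by omega
  have hA : select_best_cut_py cuts start end_cap = none := by
    unfold select_best_cut_py
    rw [aLoop_none, ha]
  -- B returns some value on the nonempty window
  cases hw : bWindow start end_cap cuts with
  | nil => exact absurd hw hne
  | cons c rest =>
    obtain ⟨d, ds, hf, _, _⟩ := staged_spec c rest
    have hB : select_best_cut_py_alt cuts start end_cap
        = some (ds.foldl (fun m p => max m p.1) d.1) := by
      rw [alt_eq cuts start end_cap c rest hw, hf]
    rw [hA, hB]
    simp
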